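-- pv_equiv track=rewrite | github.com/crvineeth97/protein-folding-ml | preprocessing.py | masked_select
-- ===== SOURCE A (Python) =====
-- def masked_select(data, mask, X=None):
--     """
--     This masked_select works slightly differently.
--     In the mask, there'll be a chain of 0s, all of these are not selected
--     Instead, they are replaced by a single value defined by X
--     This shows that the protein is discontinuous and we should not consider all
--     the amino acids as continuous after masking
--     Eg: data = [A, C, D, E, F, G, H, I, K, L, M, N] => Assume all are chars 'A'
--         mask = [1, 1, 0, 0, 0, 1, 1, 1, 0, 1, 1, 1]
--         X = 'X'
--         output = [A, C, X, G, H, I, X, L, M, N]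
--         Without X, the output would mean that C and G are adjacent and therefore the
--         calculations of backbone angles will go wrong
--     The above is just an example and this function is not applied to the primary sequence
--     """
--     output = []
--     for i, val in enumerate(mask):
--         if val == 1:
--             if i != 0 and mask[i - 1] == 0 and X is not None:
--                 output.append(X)
--             output.append(data[i])
--     return output
-- ===== SOURCE B (Python) =====
-- def masked_select(data, mask, X=None):
--     # Run-grouping rewrite: walk maximal runs of equal mask values instead of
--     # a per-element lookbehind; 1-runs are copied from data as whole slices,
--     # with the gap marker X inserted when the previous run was a 0-run.
--     output = []
--     n = len(mask)
--     i = 0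
--     prev = None
--     while i < n:
--         key = mask[i]
--         j = i + 1
--         while j < n and mask[j] == key:
--             j += 1
--         if key == 1:
--             if i != 0 and prev == 0 and X is not None:
--                 output.append(X)
--             output.extend(data[i:j])
--         prev = key
--         i = j
--     return output
-- ===== Notes on version B (the rewrite author's own statement) =====
-- stated objective: alternative
-- what changed: B walks maximal runs of equal mask values (inner scan finds each run's end) and copies each 1-run from data as one slice, inserting the gap marker when the previous run's key was 0, instead of A's flat per-element loop with an mask[i-1] lookbehind.
import Mathlib
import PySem

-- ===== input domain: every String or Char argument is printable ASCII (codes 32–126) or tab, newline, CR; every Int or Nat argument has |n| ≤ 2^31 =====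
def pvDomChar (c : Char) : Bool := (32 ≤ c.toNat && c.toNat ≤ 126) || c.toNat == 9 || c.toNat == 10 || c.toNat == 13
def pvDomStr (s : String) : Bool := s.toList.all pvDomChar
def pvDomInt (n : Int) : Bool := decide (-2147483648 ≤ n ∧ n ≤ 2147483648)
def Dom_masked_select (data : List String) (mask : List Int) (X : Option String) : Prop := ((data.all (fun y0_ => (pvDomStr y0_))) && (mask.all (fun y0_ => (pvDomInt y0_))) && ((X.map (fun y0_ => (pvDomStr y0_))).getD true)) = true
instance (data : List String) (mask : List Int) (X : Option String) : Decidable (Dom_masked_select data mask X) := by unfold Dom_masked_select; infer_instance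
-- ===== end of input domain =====

-- B is a run-grouping rewrite of A's per-element lookbehind loop (alternative decomposition,
-- same cost); return values agree on Pre_ (where A does not raise).

-- ===== PORT A =====
-- for i, val in enumerate(mask): if val == 1: [maybe append X]; append data[i]
-- data[i] is ported with a default ("") — Pre_masked_select excludes the IndexError inputs.
def masked_select (data : List String) (mask : List Int) (X : Option String) : List String :=
  (PySem.List.enumerate mask 0).foldl
    (fun output p =>
      output ++
        (if p.2 = 1 then
          (if p.1 ≠ 0 ∧ PySem.List.pyGetD mask (p.1 - 1) 99 = 0 ∧ X.isSome then [X.getD ""] else [])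
            ++ [PySem.List.pyGetD data p.1 ""]
         else [])) []

-- ===== PORT B =====
-- the outer while loop over runs, as structural recursion on the remaining suffix of mask;
-- `runtail` is the inner scan `while j < n and mask[j] == key`.
def masked_select_alt_go (data : List String) (X : Option String) (idx : Nat)
    (prev : Option Int) : List Int → List String
  | [] => []
  | key :: t =>
    let runtail := t.takeWhile (fun v => decide (v = key))
    let run := runtail.length + 1
    (if key = 1 then
       (if idx ≠ 0 ∧ prev = some 0 ∧ X.isSome then [X.getD ""] else [])
         ++ PySem.List.slice data (some (idx : Int)) (some ((idx : Int) + (run : Int)))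
     else [])
      ++ masked_select_alt_go data X (idx + run) (some key) (t.drop runtail.length)
  termination_by m => m.length
  decreasing_by simp

def masked_select_alt (data : List String) (mask : List Int) (X : Option String) : List String :=
  masked_select_alt_go data X 0 none mask

-- ===== PRECONDITION & SPEC =====
-- Pre_ excludes exactly the inputs where A raises IndexError: some mask position equal to 1
-- has no corresponding element of data.
def Pre_masked_select (data : List String) (mask : List Int) (X : Option String) : Prop :=
  ∀ i, i < mask.length → mask.getD i 0 = 1 → i < data.length
instance (data : List String) (mask : List Int) (X : Option String) : Decidable (Pre_masked_select data mask X) := by unfold Pre_masked_select; infer_instance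

def pvWitness_masked_select : List String × List Int × Option String :=
  (["A", "C", "D", "E"], [1, 1, 0, 1], some "X")

def Spec_masked_select (data : List String) (mask : List Int) (X : Option String) (out : List String) : Prop := out = masked_select_alt data mask X
instance (data : List String) (mask : List Int) (X : Option String) (out : List String) : Decidable (Spec_masked_select data mask X out) := by unfold Spec_masked_select; infer_instance

-- ===== CLAIM (what is proved, stated in full; the proofs are below) =====
def Claim_equal_masked_select : Prop := ∀ (data : List String) (mask : List Int) (X : Option String), Dom_masked_select data mask X → Pre_masked_select data mask X → Spec_masked_select data mask X (masked_select data mask X)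

-- ===== LEMMAS AND PROOFS =====

-- common reference form: per-element recursion carrying the previous mask value
def msGo (data : List String) (X : Option String) (i : Nat) (prev : Option Int) :
    List Int → List String
  | [] => []
  | v :: t =>
    (if v = 1 then
       (if i ≠ 0 ∧ prev = some 0 ∧ X.isSome then [X.getD ""] else []) ++ [data.getD i ""]
     else [])
      ++ msGo data X (i + 1) (some v) t

theorem msGo_cons (data : List String) (X : Option String) (i : Nat) (prev : Option Int)
    (v : Int) (t : List Int) :
    msGo data X i prev (v :: t) =
      (if v = 1 then
         (if i ≠ 0 ∧ prev = some 0 ∧ X.isSome then [X.getD ""] else []) ++ [data.getD i ""]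
       else [])
        ++ msGo data X (i + 1) (some v) t := rfl

-- shifting one step off a range-indexed window of data
theorem map_range_succ_getD (data : List String) (j n : Nat) :
    (List.range (n + 1)).map (fun k => data.getD (j + k) "")
      = data.getD j "" :: (List.range n).map (fun k => data.getD (j + 1 + k) "") := by
  rw [List.range_succ_eq_map, List.map_cons, List.map_map]
  simp only [Nat.add_zero]
  congr 1
  apply List.map_congr_left
  intro k _
  simp only [Function.comp]
  congr 1
  omega

-- A's loop equals msGo: induction over the suffix of mask, carrying the processed prefix
theorem maskedA_go_aux (data : List String) (X : Option String) (mask : List Int) :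
    ∀ (rest pre : List Int), mask = pre ++ rest →
      (PySem.List.enumerate rest (pre.length : Int)).flatMap
        (fun p =>
          if p.2 = 1 then
            (if p.1 ≠ 0 ∧ PySem.List.pyGetD mask (p.1 - 1) 99 = 0 ∧ X.isSome then [X.getD ""] else [])
              ++ [PySem.List.pyGetD data p.1 ""]
          else [])
      = msGo data X pre.length pre.getLast? rest := by
  intro rest
  induction rest with
  | nil => intro pre h; simp [PySem.List.enumerate, msGo]
  | cons v t ih =>
    intro pre h
    rw [PySem.List.enumerate_cons, List.flatMap_cons, msGo_cons]
    have hcond : ((pre.length : Int) ≠ 0 ∧ PySem.List.pyGetD mask ((pre.length : Int) - 1) 99 = 0 ∧ X.isSome)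
        ↔ (pre.length ≠ 0 ∧ pre.getLast? = some 0 ∧ X.isSome) := by
      rcases List.eq_nil_or_concat pre with hp | ⟨q, a, hp⟩
      · subst hp; simp
      · rw [List.concat_eq_append] at hp
        subst hp
        have hlen : (((q ++ [a]).length : Nat) : Int) - 1 = ((q.length : Nat) : Int) := by
          simp
        rw [hlen]
        have hget : PySem.List.pyGetD mask ((q.length : Nat) : Int) 99 = a := by
          rw [PySem.List.pyGetD_natCast, List.getD_eq_getElem?_getD, h,
            List.getElem?_append_left (by simp), List.getElem?_concat_length]
          rfl
        rw [hget, List.getLast?_concat]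
        simp
        intros
        omega
    have hdata : PySem.List.pyGetD data ((pre.length : Nat) : Int) "" = data.getD pre.length "" := by
      rw [PySem.List.pyGetD_natCast]
    rw [hdata]
    simp only [hcond]
    congr 1
    have h' : mask = (pre ++ [v]) ++ t := by rw [h]; simp
    have := ih (pre ++ [v]) h'
    simp only [List.length_append, List.length_cons, List.length_nil, Nat.zero_add,
      List.getLast?_concat] at this
    push_cast at this
    rw [← this]

theorem maskedA_eq_go (data : List String) (X : Option String) (mask : List Int) :
    masked_select data mask X = msGo data X 0 none mask := by
  rw [masked_select, PySem.List.foldl_append_eq_flatMap]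
  simpa using maskedA_go_aux data X mask mask [] rfl

-- data[idx:idx+n] as a map over range, under the in-bounds hypothesis
theorem drop_take_eq_map_range (data : List String) (idx n : Nat) (h : idx + n ≤ data.length) :
    (data.drop idx).take n = (List.range n).map (fun k => data.getD (idx + k) "") := by
  apply List.ext_getElem
  · simp; omega
  · intro k h1 h2
    have hk : k < n := by simpa using h2
    have hik : idx + k < data.length := by omega
    simp [List.getD_eq_getElem?_getD, List.getElem?_eq_getElem hik]

-- msGo over a constant run: each 1 contributes its data element, nothing else
theorem run_go (data : List String) (X : Option String) (key : Int) :
    ∀ (r : List Int), (∀ v ∈ r, v = key) → ∀ (s : List Int) (j : Nat),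
      msGo data X j (some key) (r ++ s) =
        (if key = 1 then (List.range r.length).map (fun k => data.getD (j + k) "") else [])
          ++ msGo data X (j + r.length) (some key) s := by
  intro r
  induction r with
  | nil => intro _ s j; simp
  | cons v r' ih =>
    intro hr s j
    have hv : v = key := hr v (by simp)
    subst hv
    rw [List.cons_append, msGo_cons, ih (fun w hw => hr w (by simp [hw])) s (j + 1)]
    by_cases hk : v = 1
    · subst hk
      simp only [List.length_cons, map_range_succ_getD]
      have hgap : (if j ≠ 0 ∧ (some (1:Int)) = some 0 ∧ X.isSome then [X.getD ""] else [])
          = ([] : List String) := by simp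
      rw [hgap]
      have harg : j + 1 + r'.length = j + (r'.length + 1) := by omega
      rw [harg]
      simp
    · rw [if_neg hk, if_neg hk, if_neg hk]
      simp only [List.nil_append, List.length_cons]
      congr 1
      omega

-- B's loop equals msGo under the index bound
theorem maskedB_eq_go (data : List String) (X : Option String) :
    ∀ (n : Nat) (m : List Int) (idx : Nat) (prev : Option Int), m.length ≤ n →
      (∀ k, k < m.length → m.getD k 0 = 1 → idx + k < data.length) →
      masked_select_alt_go data X idx prev m = msGo data X idx prev m := by
  intro n
  induction n with
  | zero =>
    intro m idx prev hn _
    have : m = [] := List.length_eq_zero_iff.mp (Nat.le_zero.mp hn)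
    subst this
    simp [masked_select_alt_go, msGo]
  | succ n ih =>
    intro m idx prev hn h
    match m with
    | [] => simp [masked_select_alt_go, msGo]
    | key :: t =>
      rw [masked_select_alt_go]
      set r := t.takeWhile (fun v => decide (v = key)) with hrdef
      have hpre : r <+: t := List.takeWhile_prefix _
      obtain ⟨s, hs⟩ := hpre
      have hdrop : t.drop r.length = s := by rw [← hs, List.drop_left]
      have hrall : ∀ v ∈ r, v = key := by
        intro v hv
        have := List.mem_takeWhile_imp hv
        simpa using this
      -- index bound transported to the tail s
      have hgetDs : ∀ k, k < s.length → (key :: t).getD (r.length + 1 + k) 0 = s.getD k 0 := by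
        intro k hk
        have hform : key :: t = (key :: r) ++ s := by rw [← hs]; rfl
        rw [hform, List.getD_eq_getElem?_getD,
          List.getElem?_append_right (by simp only [List.length_cons]; omega),
          List.getD_eq_getElem?_getD]
        have hidx : r.length + 1 + k - (key :: r).length = k := by
          simp only [List.length_cons]; omega
        rw [hidx]
      have hsbound : ∀ k, k < s.length → s.getD k 0 = 1 → (idx + (r.length + 1)) + k < data.length := by
        intro k hk h1
        have hb := h (r.length + 1 + k)
          (by rw [← hs]; simp only [List.length_cons, List.length_append]; omega)
          ((hgetDs k hk).symm ▸ h1)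
        omega
      have hslen : s.length ≤ n := by
        have : t.length = r.length + s.length := by rw [← hs]; simp
        simp only [List.length_cons] at hn
        omega
      have hihs := ih s (idx + (r.length + 1)) (some key) hslen hsbound
      have hms : msGo data X idx prev (key :: t) =
          (if key = 1 then
             (if idx ≠ 0 ∧ prev = some 0 ∧ X.isSome then [X.getD ""] else [])
               ++ [data.getD idx ""]
           else [])
            ++ msGo data X (idx + 1) (some key) (r ++ s) := by
        rw [msGo_cons, ← hs]
      rw [hms, run_go data X key r hrall s (idx + 1), hdrop, hihs]
      by_cases hk : key = 1
      · subst hk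
        have hlen1 : r.length < ((1:Int) :: t).length := by
          rw [← hs]; simp only [List.length_cons, List.length_append]; omega
        -- the run is in bounds: the last index of the run carries mask value 1
        have hlast : ((1:Int) :: t).getD r.length 0 = 1 := by
          rcases List.eq_nil_or_concat r with hr0 | ⟨q, a, hq⟩
          · rw [hr0]; rfl
          · rw [List.concat_eq_append] at hq
            have ha : a = 1 := hrall a (by simp [hq])
            rw [← hs, hq]
            have hform : (1:Int) :: (q ++ [a] ++ s) = (((1:Int) :: q) ++ [a]) ++ s := by simp
            have hidx2 : (q ++ [a]).length = ((1:Int) :: q).length := by simp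
            rw [List.getD_eq_getElem?_getD, hform, hidx2,
              List.getElem?_append_left (by simp only [List.length_append, List.length_cons]; omega),
              List.getElem?_concat_length]
            simpa using ha
        have hb := h r.length hlen1 hlast
        have hslice : PySem.List.slice data (some (idx:Int)) (some ((idx:Int) + ((r.length + 1 : Nat) : Int)))
            = (List.range (r.length + 1)).map (fun k => data.getD (idx + k) "") := by
          rw [PySem.List.slice_natCast_add, drop_take_eq_map_range data idx (r.length + 1) (by omega)]
        rw [hslice, map_range_succ_getD]
        have harg : idx + 1 + r.length = idx + (r.length + 1) := by omega
        rw [harg]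
        simp
      · rw [if_neg hk, if_neg hk, if_neg hk]
        simp only [List.nil_append]
        congr 1
        omega
-- ===== VERDICT (by name: the statement is the Claim_ definition above) =====
theorem masked_select_spec : Claim_equal_masked_select := by
  intro data mask X _ hpre
  unfold Spec_masked_select
  rw [maskedA_eq_go, masked_select_alt,
    maskedB_eq_go data X mask.length mask 0 none le_rfl
      (fun k hk h1 => by have := hpre k hk h1; omega)]
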